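-- pv_equiv track=rewrite | github.com/alixdet/ngs_nt_multialignment | realigning_functions.py | indels_front
-- ===== SOURCE A (Python) =====
-- def indels_front(subject_start, subject, entire):
--     """
--     inputs
--     :subject_start: integer, start position on the entire
--     :subject: str, subject sequence
--     :entire: str, entire sequence
--
--     returns the nomber of indels that need to be added in front of the
--     SUBJECT sequence in order to have an alignement with the entire
--     sequence
--
--     could also take previous_position as parameter to not browse through
--     the same parts
--     """
--     #number of characters met so far
--     no_char = 0
--     index = 0
--     while no_char < subject_start:
--         if entire[index] !="-":
--             no_char += 1
--         index += 1
--
--     return index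
-- ===== SOURCE B (Python) =====
-- def indels_front(subject_start, subject, entire):
--     # index table: positions of the non-dash characters of entire, built once
--     positions = [i for i, c in enumerate(entire) if c != "-"]
--     if subject_start <= 0:
--         return 0
--     return positions[subject_start - 1] + 1
-- ===== Notes on version B (the rewrite author's own statement) =====
-- stated objective: alternative
-- what changed: Replaces the incremental counting while-loop by a precomputed table of non-dash positions followed by one direct lookup (positions[subject_start-1]+1).
import Mathlib
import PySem

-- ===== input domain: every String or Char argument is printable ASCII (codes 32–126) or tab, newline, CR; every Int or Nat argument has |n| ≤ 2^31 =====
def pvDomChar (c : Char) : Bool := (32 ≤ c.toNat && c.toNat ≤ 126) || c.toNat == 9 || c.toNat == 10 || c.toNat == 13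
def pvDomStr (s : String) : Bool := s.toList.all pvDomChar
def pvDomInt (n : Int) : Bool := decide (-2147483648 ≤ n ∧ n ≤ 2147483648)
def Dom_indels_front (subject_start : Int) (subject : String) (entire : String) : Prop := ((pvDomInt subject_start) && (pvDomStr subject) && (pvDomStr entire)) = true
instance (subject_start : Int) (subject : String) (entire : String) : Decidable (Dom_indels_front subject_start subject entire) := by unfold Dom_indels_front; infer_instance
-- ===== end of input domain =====

-- B replaces A's incremental counting while-loop by a precomputed table of
-- non-dash positions and one direct lookup (objective: alternative).

-- ===== PORT A =====
-- A's while-loop: condition checked first; entire[index] on an exhausted string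
-- raises IndexError in Python (excluded by Pre_), here the remaining-suffix
-- recursion just stops and returns the current index.
def pvLoopA (ss : Int) : List Char → Int → Int → Int
  | [], _, index => index
  | c :: rest, no_char, index =>
    if no_char < ss then
      pvLoopA ss rest (if c ≠ '-' then no_char + 1 else no_char) (index + 1)
    else index

def indels_front (subject_start : Int) (subject : String) (entire : String) : Int :=
  pvLoopA subject_start entire.toList 0 0

-- ===== PORT B =====
-- positions = [i for i, c in enumerate(entire) if c != "-"]
def pvPos (chars : List Char) : List Int :=
  ((PySem.List.enumerate chars).filter (fun p => p.2 ≠ '-')).map (fun p => p.1)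

def indels_front_alt (subject_start : Int) (subject : String) (entire : String) : Int :=
  let positions := pvPos entire.toList
  if subject_start ≤ 0 then 0
  else
    -- positions[subject_start - 1]; none = IndexError, excluded by Pre_
    match PySem.List.pyGet? positions (subject_start - 1) with
    | some p => p + 1
    | none => 0

-- ===== PRECONDITION & SPEC =====
-- Pre_ excludes exactly the inputs where A raises IndexError (subject_start
-- exceeds the number of non-dash characters of entire); B raises there too.
def Pre_indels_front (subject_start : Int) (subject : String) (entire : String) : Prop :=
  subject_start ≤ ((entire.toList.filter (fun c => c ≠ '-')).length : Int)
instance (subject_start : Int) (subject : String) (entire : String) : Decidable (Pre_indels_front subject_start subject entire) := by unfold Pre_indels_front; infer_instance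

def pvWitness_indels_front : Int × String × String := (2, "AB", "A-B")

def Spec_indels_front (subject_start : Int) (subject : String) (entire : String) (out : Int) : Prop := out = indels_front_alt subject_start subject entire
instance (subject_start : Int) (subject : String) (entire : String) (out : Int) : Decidable (Spec_indels_front subject_start subject entire out) := by unfold Spec_indels_front; infer_instance

-- ===== CLAIM (what is proved, stated in full; the proofs are below) =====
def Claim_equal_indels_front : Prop := ∀ (subject_start : Int) (subject : String) (entire : String), Dom_indels_front subject_start subject entire → Pre_indels_front subject_start subject entire → Spec_indels_front subject_start subject entire (indels_front subject_start subject entire)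

-- ===== LEMMAS AND PROOFS =====

-- the loop is invariant under shifting the counters
theorem pvLoopA_shift (chars : List Char) : ∀ (ss nc idx : Int),
    pvLoopA ss chars nc idx = idx + pvLoopA (ss - nc) chars 0 0 := by
  induction chars with
  | nil => intro ss nc idx; simp [pvLoopA]
  | cons c rest ih =>
    intro ss nc idx
    by_cases h : nc < ss
    · have h0 : (0:Int) < ss - nc := by omega
      by_cases hc : c ≠ '-'
      · simp only [pvLoopA, if_pos h, if_pos h0, if_pos hc]
        rw [ih ss (nc + 1) (idx + 1), ih (ss - nc) (0 + 1) (0 + 1),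
            show ss - (nc + 1) = ss - nc - (0 + 1) from by ring]
        ring
      · simp only [pvLoopA, if_pos h, if_pos h0, if_neg hc]
        rw [ih ss nc (idx + 1), ih (ss - nc) 0 (0 + 1),
            show ss - nc = ss - nc - 0 from by ring]
        ring
    · have h0 : ¬ (0:Int) < ss - nc := by omega
      simp [pvLoopA, if_neg h, if_neg h0]

theorem pvLoopA_nonpos (chars : List Char) (ss : Int) (h : ss ≤ 0) :
    pvLoopA ss chars 0 0 = 0 := by
  have h' : ¬ (0:Int) < ss := by omega
  cases chars with
  | nil => simp [pvLoopA]
  | cons c rest => simp [pvLoopA, h']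

theorem pvPos_cons (c : Char) (rest : List Char) :
    pvPos (c :: rest) =
      (if c ≠ '-' then [(0:Int)] else []) ++ (pvPos rest).map (fun p => p + 1) := by
  have hsh : ∀ (l : List Char) (s : Int),
      PySem.List.enumerate l (s + 1) =
        (PySem.List.enumerate l s).map (fun p => (p.1 + 1, p.2)) := by
    intro l
    induction l with
    | nil => intro s; simp [PySem.List.enumerate_nil]
    | cons x xs ih => intro s; simp [PySem.List.enumerate_cons, ih (s + 1), ih s]
  unfold pvPos
  rw [show PySem.List.enumerate (c :: rest) = PySem.List.enumerate (c :: rest) 0 from rfl,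
      PySem.List.enumerate_cons, show (0:Int) + 1 = 0 + 1 from rfl, hsh rest 0]
  by_cases hc : c ≠ '-' <;>
    simp [hc, List.filter_map, List.map_map, Function.comp_def]

theorem pvPos_length (chars : List Char) :
    (pvPos chars).length = (chars.filter (fun c => c ≠ '-')).length := by
  induction chars with
  | nil => simp [pvPos]
  | cons c rest ih =>
    rw [pvPos_cons]
    by_cases hc : c ≠ '-' <;> simp [hc, ih, List.filter_cons]

-- main characterisation: under Pre_, the loop value is the table lookup
theorem pvLoopA_eq_lookup (chars : List Char) : ∀ (k : Int), 0 < k →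
    k ≤ ((chars.filter (fun c => c ≠ '-')).length : Int) →
    pvLoopA k chars 0 0 =
      (match PySem.List.pyGet? (pvPos chars) (k - 1) with
        | some p => p + 1
        | none => 0) := by
  induction chars with
  | nil => intro k hk hle; simp at hle; omega
  | cons c rest ih =>
    intro k hk hle
    have hstep : pvLoopA k (c :: rest) 0 0 =
        1 + pvLoopA (k - (if c ≠ '-' then 1 else 0)) rest 0 0 := by
      by_cases hc : c ≠ '-'
      · simp only [pvLoopA, if_pos hk, if_pos hc]
        rw [pvLoopA_shift rest k (0 + 1) (0 + 1),
            show k - (0 + 1) = k - 1 from by ring]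
        norm_num
      · simp only [pvLoopA, if_pos hk, if_neg hc]
        rw [pvLoopA_shift rest k 0 (0 + 1),
            show k - 0 = k from by ring]
        norm_num
    rw [hstep, pvPos_cons]
    by_cases hc : c ≠ '-'
    · simp only [if_pos hc]
      by_cases hk1 : k = 1
      · subst hk1
        simp [pvLoopA_nonpos rest 0 le_rfl]
      · have hk2 : 0 < k - 1 := by omega
        have hle' : k - 1 ≤ ((rest.filter (fun c => c ≠ '-')).length : Int) := by
          rw [List.filter_cons, if_pos (by simpa using hc)] at hle
          simp only [List.length_cons] at hle
          push_cast at hle ⊢; omega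
        rw [ih (k - 1) hk2 hle']
        have hget : PySem.List.pyGet? ([(0:Int)] ++ (pvPos rest).map (fun p => p + 1)) (k - 1)
            = (PySem.List.pyGet? (pvPos rest) (k - 1 - 1)).map (fun p => p + 1) := by
          rw [PySem.List.pyGet?_of_nonneg _ (by omega : (0:Int) ≤ k - 1),
              PySem.List.pyGet?_of_nonneg _ (by omega : (0:Int) ≤ k - 1 - 1)]
          have : (k - 1).toNat = (k - 1 - 1).toNat + 1 := by omega
          rw [this]
          simp [List.getElem?_map]
        rw [hget]
        cases hg : PySem.List.pyGet? (pvPos rest) (k - 1 - 1) with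
        | none =>
          exfalso
          rw [PySem.List.pyGet?_of_nonneg _ (by omega : (0:Int) ≤ k - 1 - 1)] at hg
          have := List.getElem?_eq_none_iff.mp hg
          rw [pvPos_length] at this
          omega
        | some p => simp; ring
    · simp only [if_neg hc, sub_zero]
      have hle' : k ≤ ((rest.filter (fun c => c ≠ '-')).length : Int) := by
        rw [List.filter_cons, if_neg (by simpa using hc)] at hle
        exact hle
      rw [ih k hk hle']
      have hget : PySem.List.pyGet? ([] ++ (pvPos rest).map (fun p => p + 1)) (k - 1)
          = (PySem.List.pyGet? (pvPos rest) (k - 1)).map (fun p => p + 1) := by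
        rw [PySem.List.pyGet?_of_nonneg _ (by omega : (0:Int) ≤ k - 1),
            PySem.List.pyGet?_of_nonneg _ (by omega : (0:Int) ≤ k - 1)]
        simp [List.getElem?_map]
      rw [hget]
      cases hg : PySem.List.pyGet? (pvPos rest) (k - 1) with
      | none =>
        exfalso
        rw [PySem.List.pyGet?_of_nonneg _ (by omega : (0:Int) ≤ k - 1)] at hg
        have := List.getElem?_eq_none_iff.mp hg
        rw [pvPos_length] at this
        omega
      | some p => simp; ring

-- ===== VERDICT (by name: the statement is the Claim_ definition above) =====
theorem indels_front_spec : Claim_equal_indels_front := by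
  unfold Claim_equal_indels_front
  intro ss subject entire _ hpre
  unfold Spec_indels_front indels_front indels_front_alt
  by_cases hk : ss ≤ 0
  · simp [if_pos hk, pvLoopA_nonpos entire.toList ss hk]
  · rw [if_neg hk]
    exact pvLoopA_eq_lookup entire.toList ss (by omega) hpre
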